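-- pv_equiv track=rewrite | github.com/vosslab/biology-problems | problems/biochemistry-problems/enzymes/metaboliclib.py | make_metabolite_row
-- ===== SOURCE A (Python) =====
-- def met_node(letter: str, color: str) -> str:
-- 	"""Create a circular metabolite node for pathway diagrams.
--
-- 	Args:
-- 		letter (str): The metabolite letter.
-- 		color (str): Hex color string.
--
-- 	Returns:
-- 		str: HTML string for a circular colored node.
-- 	"""
-- 	html = (
-- 		f"<span style='display: inline-block; width: 38px; height: 38px; "
-- 		f"line-height: 38px; border-radius: 50%; background: {color}; "
-- 		f"color: #fff; font-weight: 700; font-size: 16px; "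
-- 		f"border: 2px solid #333; text-align: center;'>{letter}</span>"
-- 	)
-- 	return html
--
-- CSS_MET = "border: 0; text-align: center; padding: 2px 4px;"
--
-- CSS_ARR = "border: 0; text-align: center; padding: 2px 2px; font-size: 150%;"
--
-- CSS_EMPTY = "border: 0; padding: 2px 4px;"
--
-- def make_empty_row(total_cols: int) -> list:
-- 	"""Create a row of empty table cells.
--
-- 	Args:
-- 		total_cols (int): Number of columns in the row.
--
-- 	Returns:
-- 		list: List of empty <td> HTML strings.
-- 	"""
-- 	row = [f"<td style='{CSS_EMPTY}'></td>"] * total_cols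
-- 	return row
--
-- def make_metabolite_row(total_cols: int, metabolites: list, start_col: int) -> list:
-- 	"""Create a row with metabolite nodes and arrows between them.
--
-- 	Metabolites are placed at even offsets from start_col, arrows at odd offsets.
--
-- 	Args:
-- 		total_cols (int): Number of columns in the row.
-- 		metabolites (list): List of (letter, color) tuples.
-- 		start_col (int): Column index for the first metabolite.
--
-- 	Returns:
-- 		list: Row of <td> HTML strings with metabolite nodes and arrows.
-- 	"""
-- 	row = make_empty_row(total_cols)
-- 	for i, (letter, color) in enumerate(metabolites):
-- 		col = start_col + 2 * i
-- 		if 0 <= col < total_cols: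
-- 			row[col] = f"<td style='{CSS_MET}'>{met_node(letter, color)}</td>"
-- 		# arrow between metabolites
-- 		if i < len(metabolites) - 1:
-- 			arrow_col = col + 1
-- 			if 0 <= arrow_col < total_cols:
-- 				row[arrow_col] = f"<td style='{CSS_ARR}'>&rarr;</td>"
-- 	return row
-- ===== SOURCE B (Python) =====
-- def met_node(letter: str, color: str) -> str:
-- 	html = (
-- 		f"<span style='display: inline-block; width: 38px; height: 38px; "
-- 		f"line-height: 38px; border-radius: 50%; background: {color}; "
-- 		f"color: #fff; font-weight: 700; font-size: 16px; "
-- 		f"border: 2px solid #333; text-align: center;'>{letter}</span>"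
-- 	)
-- 	return html
--
-- CSS_MET = "border: 0; text-align: center; padding: 2px 4px;"
-- CSS_ARR = "border: 0; text-align: center; padding: 2px 2px; font-size: 150%;"
-- CSS_EMPTY = "border: 0; padding: 2px 4px;"
--
-- def make_metabolite_row(total_cols: int, metabolites: list, start_col: int) -> list:
-- 	def cell(col):
-- 		offset = col - start_col
-- 		if offset >= 0 and offset % 2 == 0 and offset // 2 < len(metabolites):
-- 			letter, color = metabolites[offset // 2]
-- 			return f"<td style='{CSS_MET}'>{met_node(letter, color)}</td>"
-- 		if offset >= 1 and offset % 2 == 1 and (offset - 1) // 2 < len(metabolites) - 1: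
-- 			return f"<td style='{CSS_ARR}'>&rarr;</td>"
-- 		return f"<td style='{CSS_EMPTY}'></td>"
-- 	return [cell(col) for col in range(total_cols)]
-- ===== Notes on version B (the rewrite author's own statement) =====
-- stated objective: alternative
-- what changed: B computes each cell directly from its column index (gather over range(total_cols) with offset/parity arithmetic) instead of preallocating an empty row and overwriting cells per metabolite (scatter).
import Mathlib
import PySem

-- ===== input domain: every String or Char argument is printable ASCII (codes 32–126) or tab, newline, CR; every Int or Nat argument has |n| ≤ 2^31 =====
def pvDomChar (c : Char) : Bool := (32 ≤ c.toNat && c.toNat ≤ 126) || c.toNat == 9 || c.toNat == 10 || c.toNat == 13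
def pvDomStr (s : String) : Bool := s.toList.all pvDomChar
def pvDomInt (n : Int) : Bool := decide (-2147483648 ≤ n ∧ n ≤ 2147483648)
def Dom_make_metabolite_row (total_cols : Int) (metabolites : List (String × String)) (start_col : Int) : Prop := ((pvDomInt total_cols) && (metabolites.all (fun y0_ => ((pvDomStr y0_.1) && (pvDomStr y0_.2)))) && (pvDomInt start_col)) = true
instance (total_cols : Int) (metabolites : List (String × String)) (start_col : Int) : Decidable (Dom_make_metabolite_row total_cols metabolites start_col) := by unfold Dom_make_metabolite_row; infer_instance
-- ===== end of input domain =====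

-- B builds the row by computing each cell from its column index (gather) instead of
-- preallocating empties and overwriting per metabolite (scatter); objective: alternative.


-- ===== PORT A =====
def pvMetNode (letter : String) (color : String) : String :=
  "<span style='display: inline-block; width: 38px; height: 38px; " ++
  "line-height: 38px; border-radius: 50%; background: " ++ color ++ "; " ++
  "color: #fff; font-weight: 700; font-size: 16px; " ++
  "border: 2px solid #333; text-align: center;'>" ++ letter ++ "</span>"

def pvCssMet : String := "border: 0; text-align: center; padding: 2px 4px;"
def pvCssArr : String := "border: 0; text-align: center; padding: 2px 2px; font-size: 150%;"
def pvCssEmpty : String := "border: 0; padding: 2px 4px;"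

def pvMetTd (p : String × String) : String :=
  "<td style='" ++ pvCssMet ++ "'>" ++ pvMetNode p.1 p.2 ++ "</td>"
def pvArrTd : String := "<td style='" ++ pvCssArr ++ "'>&rarr;</td>"
def pvEmptyTd : String := "<td style='" ++ pvCssEmpty ++ "'></td>"

def make_empty_row (total_cols : Int) : List String :=
  List.replicate total_cols.toNat pvEmptyTd

def make_metabolite_row (total_cols : Int) (metabolites : List (String × String)) (start_col : Int) : List String :=
  (PySem.List.enumerate metabolites 0).foldl
    (fun row p =>
      let col := start_col + 2 * p.1
      let row1 := if 0 ≤ col ∧ col < total_cols then row.set col.toNat (pvMetTd p.2) else row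
      if p.1 < (metabolites.length : Int) - 1 then
        let arrow_col := col + 1
        if 0 ≤ arrow_col ∧ arrow_col < total_cols then row1.set arrow_col.toNat pvArrTd else row1
      else row1)
    (make_empty_row total_cols)

-- ===== PORT B =====
def pvCell (metabolites : List (String × String)) (start_col : Int) (col : Int) : String :=
  let offset := col - start_col
  if 0 ≤ offset ∧ offset % 2 = 0 ∧ offset / 2 < (metabolites.length : Int) then
    pvMetTd (metabolites.getD (offset / 2).toNat ("", ""))
  else if 1 ≤ offset ∧ offset % 2 = 1 ∧ (offset - 1) / 2 < (metabolites.length : Int) - 1 then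
    pvArrTd
  else pvEmptyTd

def make_metabolite_row_alt (total_cols : Int) (metabolites : List (String × String)) (start_col : Int) : List String :=
  (PySem.List.pyRange 0 total_cols 1).map (pvCell metabolites start_col)

-- ===== PRECONDITION & SPEC =====
def Spec_make_metabolite_row (total_cols : Int) (metabolites : List (String × String)) (start_col : Int) (out : List String) : Prop := out = make_metabolite_row_alt total_cols metabolites start_col
instance (total_cols : Int) (metabolites : List (String × String)) (start_col : Int) (out : List String) : Decidable (Spec_make_metabolite_row total_cols metabolites start_col out) := by unfold Spec_make_metabolite_row; infer_instance

-- ===== CLAIM (what is proved, stated in full; the proofs are below) =====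
def Claim_equal_make_metabolite_row : Prop := ∀ (total_cols : Int) (metabolites : List (String × String)) (start_col : Int), Dom_make_metabolite_row total_cols metabolites start_col → Spec_make_metabolite_row total_cols metabolites start_col (make_metabolite_row total_cols metabolites start_col)

-- ===== LEMMAS AND PROOFS =====

-- The loop body of A, with the full-list length m kept as a parameter.
def pvF (tc sc m : Int) : List String → (Int × String × String) → List String :=
  fun row p =>
    let col := sc + 2 * p.1
    let row1 := if 0 ≤ col ∧ col < tc then row.set col.toNat (pvMetTd p.2) else row
    if p.1 < m - 1 then
      let arrow_col := col + 1
      if 0 ≤ arrow_col ∧ arrow_col < tc then row1.set arrow_col.toNat pvArrTd else row1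
    else row1

theorem make_metabolite_row_eq_foldF (tc : Int) (mets : List (String × String)) (sc : Int) :
    make_metabolite_row tc mets sc
      = (PySem.List.enumerate mets 0).foldl (pvF tc sc (mets.length : Int)) (make_empty_row tc) := rfl

-- What cell j holds after processing the suffix t (enumerated from s), in terms of
-- off = j - sc - 2*s; `old` is the value the cell had before this suffix runs.
def pvOv (t : List (String × String)) (s m off : Int) (old : String) : String :=
  if 0 ≤ off ∧ off % 2 = 0 ∧ off / 2 < (t.length : Int) then
    pvMetTd (t.getD (off / 2).toNat ("", ""))
  else if 0 ≤ off ∧ off % 2 = 1 ∧ s + (off - 1) / 2 < m - 1 ∧ (off - 1) / 2 < (t.length : Int) then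
    pvArrTd
  else old

theorem pvSet_getD (l : List String) (i : Nat) (v : String) (j : Nat) (hj : j < l.length) :
    (l.set i v).getD j "" = if i = j then v else l.getD j "" := by
  by_cases h : i = j
  · subst h; simp [List.getD, hj]
  · simp [List.getD, List.getElem?_set_ne, h]

theorem pvF_length (tc sc m : Int) (l : List (Int × String × String)) (row : List String) :
    (l.foldl (pvF tc sc m) row).length = row.length := by
  induction l generalizing row with
  | nil => rfl
  | cons p l ih =>
      rw [List.foldl_cons, ih]
      simp only [pvF]
      split_ifs <;> simp

theorem pvF_getElem? (tc sc m : Int) (t : List (String × String)) (s : Int)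
    (row : List String) (hrow : row.length = tc.toNat) (j : Nat) (hj : j < tc.toNat) :
    ((PySem.List.enumerate t s).foldl (pvF tc sc m) row)[j]?
      = some (pvOv t s m ((j : Int) - sc - 2 * s) (row.getD j "")) := by
  induction t generalizing s row with
  | nil =>
      rw [PySem.List.enumerate_nil, List.foldl_nil]
      unfold pvOv
      rw [if_neg (by simp only [List.length_nil, Nat.cast_zero]; omega),
        if_neg (by simp only [List.length_nil, Nat.cast_zero]; omega)]
      simp [List.getD, List.getElem?_eq_getElem (hrow ▸ hj)]
  | cons x r ih =>
      rw [PySem.List.enumerate_cons, List.foldl_cons,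
        ih (s + 1) _ (by simp only [pvF]; split_ifs <;> simp [hrow])]
      congr 1
      set off : Int := (j : Int) - sc - 2 * s with hoff
      have hj0 : (0 : Int) ≤ (j : Int) := by positivity
      have hj' : (j : Int) < tc := by omega
      have hstep : (pvF tc sc m row (s, x)).getD j ""
          = (if off = 0 then pvMetTd x
             else if off = 1 ∧ s < m - 1 then pvArrTd
             else row.getD j "") := by
        simp only [pvF]
        by_cases h0 : off = 0
        · rw [if_pos h0, if_pos (show (0:Int) ≤ sc + 2 * s ∧ sc + 2 * s < tc by omega)]
          have htn : (sc + 2 * s).toNat = j := by omega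
          by_cases hm : s < m - 1
          · rw [if_pos hm]
            by_cases hc : (0:Int) ≤ sc + 2 * s + 1 ∧ sc + 2 * s + 1 < tc
            · rw [if_pos hc, pvSet_getD _ _ _ _ (by simp [hrow]; omega),
                if_neg (show (sc + 2 * s + 1).toNat ≠ j by omega),
                pvSet_getD _ _ _ _ (by omega), if_pos htn]
            · rw [if_neg hc, pvSet_getD _ _ _ _ (by omega), if_pos htn]
          · rw [if_neg hm, pvSet_getD _ _ _ _ (by omega), if_pos htn]
        · rw [if_neg h0]
          by_cases h1 : off = 1
          · by_cases hm : s < m - 1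
            · rw [if_pos (show off = 1 ∧ s < m - 1 from ⟨h1, hm⟩), if_pos hm,
                if_pos (show (0:Int) ≤ sc + 2 * s + 1 ∧ sc + 2 * s + 1 < tc by omega)]
              have htn : (sc + 2 * s + 1).toNat = j := by omega
              by_cases hc : (0:Int) ≤ sc + 2 * s ∧ sc + 2 * s < tc
              · rw [if_pos hc, pvSet_getD _ _ _ _ (by simp [hrow]; omega), if_pos htn]
              · rw [if_neg hc, pvSet_getD _ _ _ _ (by omega), if_pos htn]
            · rw [if_neg (show ¬(off = 1 ∧ s < m - 1) from fun h => hm h.2), if_neg hm]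
              by_cases hc : (0:Int) ≤ sc + 2 * s ∧ sc + 2 * s < tc
              · rw [if_pos hc, pvSet_getD _ _ _ _ (by omega),
                  if_neg (show (sc + 2 * s).toNat ≠ j by omega)]
              · rw [if_neg hc]
          · rw [if_neg (show ¬(off = 1 ∧ s < m - 1) from fun h => h1 h.1)]
            by_cases hm : s < m - 1
            · rw [if_pos hm]
              by_cases hc2 : (0:Int) ≤ sc + 2 * s + 1 ∧ sc + 2 * s + 1 < tc
              · rw [if_pos hc2]
                by_cases hc1 : (0:Int) ≤ sc + 2 * s ∧ sc + 2 * s < tc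
                · rw [if_pos hc1, pvSet_getD _ _ _ _ (by simp [hrow]; omega),
                    if_neg (show (sc + 2 * s + 1).toNat ≠ j by omega),
                    pvSet_getD _ _ _ _ (by omega),
                    if_neg (show (sc + 2 * s).toNat ≠ j by omega)]
                · rw [if_neg hc1, pvSet_getD _ _ _ _ (by omega),
                    if_neg (show (sc + 2 * s + 1).toNat ≠ j by omega)]
              · rw [if_neg hc2]
                by_cases hc1 : (0:Int) ≤ sc + 2 * s ∧ sc + 2 * s < tc
                · rw [if_pos hc1, pvSet_getD _ _ _ _ (by omega),
                    if_neg (show (sc + 2 * s).toNat ≠ j by omega)]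
                · rw [if_neg hc1]
            · rw [if_neg hm]
              by_cases hc1 : (0:Int) ≤ sc + 2 * s ∧ sc + 2 * s < tc
              · rw [if_pos hc1, pvSet_getD _ _ _ _ (by omega),
                  if_neg (show (sc + 2 * s).toNat ≠ j by omega)]
              · rw [if_neg hc1]
      rw [hstep, show (j : Int) - sc - 2 * (s + 1) = off - 2 by omega]
      simp only [pvOv, List.length_cons, Nat.cast_add, Nat.cast_one]
      split_ifs <;>
        first
          | rfl
          | (exfalso; omega)
          | (rw [show (off / 2).toNat = ((off - 2) / 2).toNat + 1 from by omega]
             simp [List.getD])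
          | (rw [show (off / 2).toNat = 0 from by omega]; simp [List.getD])

-- ===== VERDICT (by name: the statement is the Claim_ definition above) =====
theorem make_metabolite_row_spec : Claim_equal_make_metabolite_row := by
  intro tc mets sc _
  unfold Spec_make_metabolite_row
  apply List.ext_getElem?
  intro j
  by_cases hj : j < tc.toNat
  · rw [make_metabolite_row_eq_foldF,
      pvF_getElem? tc sc (mets.length : Int) mets 0 (make_empty_row tc)
        (by simp [make_empty_row, pvEmptyTd]) j hj]
    rw [make_metabolite_row_alt, show tc = ((tc.toNat : Nat) : Int) from by omega,
      PySem.List.getElem?_map_pyRange_zero _ _ _ hj]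
    congr 1
    have hold : (make_empty_row ((tc.toNat : Nat) : Int)).getD j "" = pvEmptyTd := by
      simp only [make_empty_row, List.getD, List.getElem?_replicate]
      rw [if_pos (by omega)]
      rfl
    rw [hold, show (j : Int) - sc - 2 * 0 = (j : Int) - sc from by ring]
    simp only [pvOv, pvCell]
    split_ifs <;> first | rfl | (exfalso; omega)
  · have h1 : (make_metabolite_row tc mets sc).length = tc.toNat := by
      rw [make_metabolite_row_eq_foldF, pvF_length]; simp [make_empty_row]
    have h2 : (make_metabolite_row_alt tc mets sc).length = tc.toNat := by
      simp [make_metabolite_row_alt, PySem.List.length_pyRange_one]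
    rw [List.getElem?_eq_none (by omega), List.getElem?_eq_none (by omega)]
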